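-- pv_equiv track=rewrite | github.com/the-carpnter/codewars | apparently_modifying_strings.py | apparently
-- ===== SOURCE A (Python) =====
-- def apparently(string):
--     text = []
--     *string, = string.split()
--     for i, x in enumerate(string):
--         text += [x]
--         if (x == 'and' or x == 'but'):
--             try:
--                 if string[i+1] != 'apparently':
--                     text += ['apparently']
--             except IndexError:
--                 text += ['apparently']
--
--     return ' '.join(text)
-- ===== SOURCE B (Python) =====
-- def apparently(string):
--     toks = string.split()
--     # pass 1: flatMap each token to itself plus an unconditional placeholder after and/but
--     expanded = [x for t in toks
--                 for x in ((t, None) if t in ('and', 'but') else (t,))]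
--     # pass 2: zip with successors; drop a placeholder whose successor is already 'apparently'
--     nexts = expanded[1:] + ['']
--     return ' '.join(cur if cur is not None else 'apparently'
--                     for cur, nxt in zip(expanded, nexts)
--                     if cur is not None or nxt != 'apparently')
-- ===== Notes on version B (the rewrite author's own statement) =====
-- stated objective: alternative
-- what changed: Staged two-pass pipeline: pass 1 flatMaps every token to itself plus an unconditional placeholder after the trigger words and/but; pass 2 zips the expanded list with its successor list, dropping placeholders whose successor already carries the inserted word and renaming the rest - replacing A's single loop with conditional look-ahead via try/except.
import Mathlib
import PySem

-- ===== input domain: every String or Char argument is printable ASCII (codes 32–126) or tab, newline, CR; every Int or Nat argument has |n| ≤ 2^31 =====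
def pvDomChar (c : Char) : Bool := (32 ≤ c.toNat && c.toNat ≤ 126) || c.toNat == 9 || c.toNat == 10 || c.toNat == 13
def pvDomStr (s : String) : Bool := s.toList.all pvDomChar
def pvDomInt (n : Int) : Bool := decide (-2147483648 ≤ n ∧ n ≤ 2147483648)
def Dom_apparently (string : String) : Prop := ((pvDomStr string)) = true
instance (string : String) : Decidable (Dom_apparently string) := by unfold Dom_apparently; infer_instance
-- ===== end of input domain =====

-- B replaces A's conditional look-ahead loop by a staged two-pass pipeline
-- (unconditional placeholder insertion, then a zip-with-successor filter/rename); objective: alternative.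

-- ===== PORT A =====
-- A's loop body: append x; if x in ('and','but'): look AHEAD at tokens[i+1]
-- (the IndexError branch is pyGet? = none) and append 'apparently' unless the next token is 'apparently'.
def stepA (toks : List String) (text : List String) (ix : Int × String) : List String :=
  let text := text ++ [ix.2]
  if ix.2 = "and" ∨ ix.2 = "but" then
    match PySem.List.pyGet? toks (ix.1 + 1) with
    | some t => if t ≠ "apparently" then text ++ ["apparently"] else text
    | none => text ++ ["apparently"]
  else text

def apparently (string : String) : String :=
  let toks := PySem.Str.split₀ string
  PySem.Str.join " " ((PySem.List.enumerate toks).foldl (stepA toks) [])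

-- ===== PORT B =====
-- pass 1: each token becomes itself plus an unconditional placeholder (none) after 'and'/'but'
def expandB (toks : List String) : List (Option String) :=
  toks.flatMap (fun t => if t = "and" ∨ t = "but" then [some t, none] else [some t])

-- pass 2: zip with successor list (sentinel ''), drop placeholders whose successor is
-- already 'apparently', rename the surviving placeholders to 'apparently'
def apparently_alt (string : String) : String :=
  let expanded := expandB (PySem.Str.split₀ string)
  let nexts := expanded.drop 1 ++ [some ""]
  PySem.Str.join " "
    (((expanded.zip nexts).filter
        (fun p => p.1.isSome || p.2 != some "apparently")).map
      (fun p => p.1.getD "apparently"))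

-- ===== PRECONDITION & SPEC =====
def Spec_apparently (string : String) (out : String) : Prop := out = apparently_alt string
instance (string : String) (out : String) : Decidable (Spec_apparently string out) := by unfold Spec_apparently; infer_instance

-- ===== CLAIM (what is proved, stated in full; the proofs are below) =====
def Claim_equal_apparently : Prop := ∀ (string : String), Dom_apparently string → Spec_apparently string (apparently string)

-- ===== LEMMAS AND PROOFS =====

-- canonical recursive description of the token transformation (look-ahead form)
def fTok : List String → List String
  | [] => []
  | x :: rest =>
    x :: (if (x = "and" ∨ x = "but") ∧ rest.head? ≠ some "apparently"
          then "apparently" :: fTok rest else fTok rest)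

theorem fTok_cons (x : String) (rest : List String) :
    fTok (x :: rest)
      = x :: (if (x = "and" ∨ x = "but") ∧ rest.head? ≠ some "apparently"
              then "apparently" :: fTok rest else fTok rest) := rfl

-- A's fold over a suffix of the enumeration computes fTok of the suffix
theorem foldA_suffix (toks : List String) :
    ∀ (suf : List String) (i : Nat), toks.drop i = suf → ∀ (text : List String),
      (PySem.List.enumerate suf (i : Int)).foldl (stepA toks) text = text ++ fTok suf := by
  intro suf
  induction suf with
  | nil => intro i _ text; simp [PySem.List.enumerate, fTok]
  | cons x rest ih =>
    intro i hdrop text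
    have hrest : toks.drop (i + 1) = rest := by
      have := congrArg List.tail hdrop
      simpa [List.tail_drop] using this
    have hget : PySem.List.pyGet? toks ((i : Int) + 1) = rest.head? := by
      have h1 : PySem.List.pyGet? toks ((i + 1 : Nat) : Int) = toks[(i+1)]? :=
        PySem.List.pyGet?_natCast toks (i + 1)
      have h2 : toks[(i+1)]? = rest.head? := by
        rw [← hrest]
        rcases Nat.lt_or_ge (i+1) toks.length with h | h
        · simp [List.head?_drop, h]
        · simp [List.getElem?_eq_none h, List.drop_eq_nil_of_le h]
      push_cast at h1
      rw [h1, h2]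
    rw [PySem.List.enumerate_cons, List.foldl_cons]
    have ihx := ih (i + 1) hrest
    have hc : ((i : Int) + 1) = ((i + 1 : Nat) : Int) := by push_cast; ring
    rw [hc, ihx]
    rw [fTok_cons]
    unfold stepA
    simp only [hget]
    by_cases hab : x = "and" ∨ x = "but"
    · cases hh : rest.head? with
      | none => simp [hab, List.append_assoc]
      | some t =>
        by_cases ht : t = "apparently"
        · simp [hab, ht, List.append_assoc]
        · simp [hab, ht, List.append_assoc]
    · simp [hab, List.append_assoc]

-- recursive description of B's second pass (zip-with-successor, filter, rename)
def gPass : List (Option String) → List String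
  | [] => []
  | cur :: rest =>
    (if cur.isSome || (rest.head?.getD (some "")) != some "apparently"
     then [cur.getD "apparently"] else []) ++ gPass rest

-- the zip/filter/map pipeline equals gPass
theorem zip_eq_gPass : ∀ (l : List (Option String)),
    ((l.zip (l.drop 1 ++ [some ""])).filter
        (fun p => p.1.isSome || p.2 != some "apparently")).map
      (fun p => p.1.getD "apparently") = gPass l := by
  intro l
  induction l with
  | nil => rfl
  | cons cur rest ih =>
    cases rest with
    | nil => unfold gPass; cases cur <;> simp [List.zip, List.filter, List.map, gPass]
    | cons b rest' =>
      have hz : ((cur :: b :: rest').zip ((cur :: b :: rest').drop 1 ++ [some ""]))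
          = (cur, b) :: ((b :: rest').zip ((b :: rest').drop 1 ++ [some ""])) := by
        simp [List.zip_cons_cons]
      rw [hz]
      unfold gPass
      by_cases hc : (cur.isSome || b != some "apparently") = true
      · simp [hc, List.head?]
        simpa using ih
      · simp only [Bool.not_eq_true] at hc
        simp [hc, List.head?]
        simpa using ih

-- (expandB rest).head? seen through getD: agrees with rest.head? for the 'apparently' test
theorem expandB_head_test (rest : List String) :
    (((expandB rest).head?.getD (some "")) != some "apparently")
      = !(rest.head? == some "apparently") := by
  cases rest with
  | nil => rfl
  | cons r rest' =>
    have : (expandB (r :: rest')).head? = some (some r) := by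
      unfold expandB
      by_cases h : r = "and" ∨ r = "but" <;> simp [h]
    rw [this]
    simp [bne]

-- B's staged pipeline computes the same token list as the look-ahead description
theorem gPass_expandB : ∀ (toks : List String), gPass (expandB toks) = fTok toks := by
  intro toks
  induction toks with
  | nil => rfl
  | cons x rest ih =>
    by_cases hab : x = "and" ∨ x = "but"
    · have he : expandB (x :: rest) = some x :: none :: expandB rest := by
        unfold expandB; simp [hab]
      rw [he]
      unfold gPass
      rw [fTok_cons]
      unfold gPass
      rw [expandB_head_test, ih]
      by_cases hh : rest.head? = some "apparently"
      · simp [hab, hh]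
      · simp [hab, hh]
    · have he : expandB (x :: rest) = some x :: expandB rest := by
        unfold expandB; simp [hab]
      rw [he]
      unfold gPass
      rw [fTok_cons, ih]
      simp [hab]

-- ===== VERDICT (by name: the statement is the Claim_ definition above) =====
theorem apparently_spec : Claim_equal_apparently := by
  intro s _
  have hA := foldA_suffix (PySem.Str.split₀ s) (PySem.Str.split₀ s) 0 (by simp) []
  rw [Nat.cast_zero] at hA
  show _ = _
  simp only [apparently, apparently_alt]
  rw [hA, zip_eq_gPass, gPass_expandB]
  simp
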